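-- pv_equiv track=rewrite | github.com/alswo1212/jungle_baekjoon | 백준/Gold/10026. 적록색약/적록색약.py | convert_picture
-- ===== SOURCE A (Python) =====
-- def convert_picture(picture:list[str], bundles:list[str]) -> list[list[int]]:
--     result = []
--     for i in range(len(picture)):
--         row = []
--         for j in range(len(picture[i])):
--             for idx, bundle in enumerate(bundles):
--                 if picture[i][j] in bundle:
--                     row.append(idx)
--                     break
--         result.append(row)
--     return result
-- ===== SOURCE B (Python) =====
-- def convert_picture(picture: list[str], bundles: list[str]) -> list[list[int]]:
--     result = []
--     for row in picture:
--         marks = [None] * len(row)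
--         for idx, b in reversed(list(enumerate(bundles))):
--             marks = [idx if ch in b else m for ch, m in zip(row, marks)]
--         result.append([m for m in marks if m is not None])
--     return result
-- ===== Notes on version B (the rewrite author's own statement) =====
-- stated objective: alternative
-- what changed: Bundle-major sweep: iterates bundles back-to-front per row, overwriting a positional marks array so the lowest bundle index wins by last overwrite, then filters unmarked cells; replaces A's pixel-major first-match scan with break.
import Mathlib
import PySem

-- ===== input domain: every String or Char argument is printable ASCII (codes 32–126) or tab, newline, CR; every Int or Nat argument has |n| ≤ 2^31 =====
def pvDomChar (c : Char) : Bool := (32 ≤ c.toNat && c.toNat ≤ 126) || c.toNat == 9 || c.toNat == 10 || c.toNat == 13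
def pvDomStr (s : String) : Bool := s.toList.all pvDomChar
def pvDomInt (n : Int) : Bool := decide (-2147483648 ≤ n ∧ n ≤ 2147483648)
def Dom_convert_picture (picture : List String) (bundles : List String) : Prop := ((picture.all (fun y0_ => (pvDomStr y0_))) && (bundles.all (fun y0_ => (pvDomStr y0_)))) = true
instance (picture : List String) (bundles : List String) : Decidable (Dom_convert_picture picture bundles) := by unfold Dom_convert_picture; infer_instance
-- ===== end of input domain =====

-- B sweeps bundles back-to-front per row, overwriting a positional marks array, instead of A's per-cell first-match scan; equivalence proved on all inputs.

-- ===== PORT A =====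
-- inner 'for idx, bundle in enumerate(bundles): if ch in bundle: append(idx); break'
-- ('ch in bundle' for the single char ch is char membership in the bundle's characters)
def pvScanBundles (c : Char) : List (Int × String) → Option Int
  | [] => none
  | (i, b) :: rest => if b.toList.contains c then some i else pvScanBundles c rest

def convert_picture (picture : List String) (bundles : List String) : List (List Int) :=
  picture.foldl (fun result rowStr =>
    result ++ [rowStr.toList.foldl (fun row c =>
      match pvScanBundles c (PySem.List.enumerate bundles 0) with
      | some idx => row ++ [idx]
      | none => row) []]) []

-- ===== PORT B =====
-- 'marks = [idx if ch in b else m for ch, m in zip(row, marks)]'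
def pvMark (row : List Char) (marks : List (Option Int)) (idx : Int) (b : String) : List (Option Int) :=
  (row.zip marks).map (fun p => if b.toList.contains p.1 then some idx else p.2)

def convert_picture_alt (picture : List String) (bundles : List String) : List (List Int) :=
  picture.foldl (fun result rowStr =>
    result ++ [(((PySem.List.enumerate bundles 0).reverse).foldl
      (fun marks p => pvMark rowStr.toList marks p.1 p.2)
      (rowStr.toList.map (fun _ => none))).filterMap (fun m => m)]) []

-- ===== PRECONDITION & SPEC =====
def Spec_convert_picture (picture : List String) (bundles : List String) (out : List (List Int)) : Prop := out = convert_picture_alt picture bundles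
instance (picture : List String) (bundles : List String) (out : List (List Int)) : Decidable (Spec_convert_picture picture bundles out) := by unfold Spec_convert_picture; infer_instance

-- ===== CLAIM (what is proved, stated in full; the proofs are below) =====
def Claim_equal_convert_picture : Prop := ∀ (picture : List String) (bundles : List String), Dom_convert_picture picture bundles → Spec_convert_picture picture bundles (convert_picture picture bundles)

-- ===== LEMMAS AND PROOFS =====

-- marking applied to marks that are already a per-position scan pushes one pair onto the scan
lemma pvMark_map_scan (row : List Char) (ps : List (Int × String)) (i : Int) (b : String) :
    pvMark row (row.map (fun c => pvScanBundles c ps)) i b =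
      row.map (fun c => pvScanBundles c ((i, b) :: ps)) := by
  unfold pvMark
  induction row with
  | nil => simp
  | cons c cs ih =>
    simp only [List.map_cons, List.zip_cons_cons, ih]
    simp [pvScanBundles]

-- the reversed bundle sweep computes the per-position first-match scan
lemma pvSweep_eq_scan (row : List Char) (ps : List (Int × String)) :
    (ps.reverse.foldl (fun marks p => pvMark row marks p.1 p.2) (row.map (fun _ => none))) =
      row.map (fun c => pvScanBundles c ps) := by
  rw [List.foldl_reverse]
  induction ps with
  | nil => simp [pvScanBundles]
  | cons p ps ih =>
    simp only [List.foldr_cons, ih]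
    exact pvMark_map_scan row ps p.1 p.2

-- A's inner append-on-hit loop is a filterMap
lemma pvRow_foldl (f : Char → Option Int) (cs : List Char) :
    ∀ acc : List Int,
      (cs.foldl (fun row c => match f c with | some idx => row ++ [idx] | none => row) acc) =
        acc ++ cs.filterMap f := by
  induction cs with
  | nil => intro acc; simp
  | cons c cs ih =>
    intro acc
    simp only [List.foldl_cons, List.filterMap_cons]
    cases h : f c <;> simp [ih]

-- ===== VERDICT (by name: the statement is the Claim_ definition above) =====
theorem convert_picture_spec : Claim_equal_convert_picture := by
  intro picture bundles _
  unfold Spec_convert_picture convert_picture convert_picture_alt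
  apply PySem.List.foldl_congr_mem
  intro acc rowStr _
  rw [pvSweep_eq_scan, pvRow_foldl]
  simp [List.filterMap_map, Function.comp]
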